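-- pv_equiv track=rewrite | github.com/weeasd57/stokscanai | api/routers/scan_ai_fast.py | _normalize_exchange
-- ===== SOURCE A (Python) =====
-- def _normalize_exchange(value: str) -> str:
--     ex = (value or "").strip().upper()
--     if not ex:
--         return ex
--     for sep in ("(", " ", "/"):
--         if sep in ex:
--             ex = ex.split(sep)[0].strip()
--     return ex
-- ===== SOURCE B (Python) =====
-- _SEPS = {'(', ' ', '/'}
--
-- def _normalize_exchange(value: str) -> str:
--     ex = (value or "").strip().upper()
--     for i, ch in enumerate(ex):
--         if ch in _SEPS:
--             return ex[:i].strip()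
--     return ex
-- ===== Notes on version B (the rewrite author's own statement) =====
-- stated objective: idiomatic
-- what changed: Replaced the three sequential split/strip passes (one per separator, each rescanning the whole string) by a single left-to-right scan that stops at the first character in the separator set and returns the stripped prefix.
import Mathlib
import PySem

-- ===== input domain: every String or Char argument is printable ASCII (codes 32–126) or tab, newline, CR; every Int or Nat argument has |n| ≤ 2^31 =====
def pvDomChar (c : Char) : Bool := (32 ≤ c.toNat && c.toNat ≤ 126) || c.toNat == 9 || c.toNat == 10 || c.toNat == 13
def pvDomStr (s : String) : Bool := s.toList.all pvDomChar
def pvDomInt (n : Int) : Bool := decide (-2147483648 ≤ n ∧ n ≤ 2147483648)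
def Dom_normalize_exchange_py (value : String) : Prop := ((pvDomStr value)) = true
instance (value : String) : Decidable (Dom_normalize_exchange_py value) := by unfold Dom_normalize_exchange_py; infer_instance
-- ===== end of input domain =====

-- B replaces A's three sequential split/strip passes by a single left-to-right scan that stops
-- at the first separator character and returns the stripped prefix (same return value, one pass).
-- ===== PORT A =====
def normalize_exchange_py (value : String) : String :=
  let ex := PySem.Str.upper (PySem.Str.strip value)
  if ex = "" then ex
  else
    ["(", " ", "/"].foldl (fun ex sep =>
      if PySem.Str.isIn sep ex then
        -- ex.split(sep)[0]: sep is a nonempty literal, so split? is some and the split list is nonempty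
        PySem.Str.strip (((PySem.Str.split? ex sep).getD []).headD "")
      else ex) ex

-- ===== PORT B =====
def pvAltLoop (ex : String) : List (Int × Char) → String
  | [] => ex
  | (i, ch) :: rest =>
      if ch ∈ ['(', ' ', '/'] then PySem.Str.strip (PySem.Str.slice ex none (some i))
      else pvAltLoop ex rest

def normalize_exchange_py_alt (value : String) : String :=
  let ex := PySem.Str.upper (PySem.Str.strip value)
  pvAltLoop ex (PySem.List.enumerate ex.toList 0)

-- ===== PRECONDITION & SPEC =====
def Spec_normalize_exchange_py (value : String) (out : String) : Prop := out = normalize_exchange_py_alt value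
instance (value : String) (out : String) : Decidable (Spec_normalize_exchange_py value out) := by unfold Spec_normalize_exchange_py; infer_instance

-- ===== CLAIM (what is proved, stated in full; the proofs are below) =====
def Claim_equal_normalize_exchange_py : Prop := ∀ (value : String), Dom_normalize_exchange_py value → Spec_normalize_exchange_py value (normalize_exchange_py value)

-- ===== LEMMAS AND PROOFS =====

-- the separator set, and the "keep scanning" predicate, shared by the proofs
def pvSep (c : Char) : Bool := decide (c ∈ ['(', ' ', '/'])

lemma pv_isspace_upperChar (c : Char) :
    PySem.Chars.isspace (PySem.Chars.upperChar c) = PySem.Chars.isspace c := by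
  unfold PySem.Chars.upperChar
  split
  · rename_i h
    unfold PySem.Chars.islower at h
    have hc : 97 ≤ c.toNat ∧ c.toNat ≤ 122 := by
      simpa [Char.le_def] using h
    have hv : (c.toNat - 32).isValidChar := Or.inl (by omega)
    unfold PySem.Chars.isspace
    rw [Char.toNat_ofNat, if_pos hv]
    rw [Bool.eq_iff_iff]
    simp only [Bool.or_eq_true, Bool.and_eq_true, decide_eq_true_eq]
    omega
  · rfl

-- `upper` commutes with `lstrip` / `rstrip` / `strip`
lemma pv_lstrip_upper (l : List Char) :
    PySem.Chars.lstrip (PySem.Chars.upper l) = PySem.Chars.upper (PySem.Chars.lstrip l) := by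
  unfold PySem.Chars.lstrip PySem.Chars.upper
  rw [List.dropWhile_map]
  congr 1
  exact congrFun (congrArg _ (funext fun c => by
    simp [Function.comp, pv_isspace_upperChar])) l

lemma pv_rstrip_upper (l : List Char) :
    PySem.Chars.rstrip (PySem.Chars.upper l) = PySem.Chars.upper (PySem.Chars.rstrip l) := by
  unfold PySem.Chars.rstrip PySem.Chars.upper
  rw [← List.map_reverse, List.dropWhile_map, List.map_reverse]
  congr 2
  exact congrFun (congrArg _ (funext fun c => by
    simp [Function.comp, pv_isspace_upperChar])) l.reverse

lemma pv_strip_upper (l : List Char) :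
    PySem.Chars.strip (PySem.Chars.upper l) = PySem.Chars.upper (PySem.Chars.strip l) := by
  unfold PySem.Chars.strip
  rw [pv_lstrip_upper, pv_rstrip_upper]

-- decomposition: a list is its rstrip followed by trailing whitespace
lemma pv_rstrip_decomp (l : List Char) :
    ∃ w, l = PySem.Chars.rstrip l ++ w ∧ ∀ c ∈ w, PySem.Chars.isspace c = true := by
  refine ⟨(l.reverse.takeWhile PySem.Chars.isspace).reverse, ?_, ?_⟩
  · unfold PySem.Chars.rstrip
    rw [← List.reverse_append, List.takeWhile_append_dropWhile, List.reverse_reverse]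
  · intro c hc
    exact List.mem_takeWhile_imp (List.mem_reverse.mp hc)

lemma pv_lstrip_rstrip (l : List Char) (h : PySem.Chars.lstrip l = l) :
    PySem.Chars.lstrip (PySem.Chars.rstrip l) = PySem.Chars.rstrip l := by
  obtain ⟨w, hw, hws⟩ := pv_rstrip_decomp l
  cases hr : PySem.Chars.rstrip l with
  | nil => rfl
  | cons a t =>
    have hl : l = a :: (t ++ w) := by rw [hw, hr]; simp
    have ha : PySem.Chars.isspace a = false := by
      cases hsa : PySem.Chars.isspace a with
      | false => rfl
      | true =>
        exfalso
        unfold PySem.Chars.lstrip at h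
        rw [hl, List.dropWhile_cons, if_pos hsa] at h
        have hle := List.length_dropWhile_le PySem.Chars.isspace (t ++ w)
        rw [h] at hle
        simp at hle
    unfold PySem.Chars.lstrip
    rw [List.dropWhile_cons, if_neg (by simp [ha])]

lemma pv_lstrip_idem (l : List Char) :
    PySem.Chars.lstrip (PySem.Chars.lstrip l) = PySem.Chars.lstrip l := by
  unfold PySem.Chars.lstrip
  exact List.dropWhile_idempotent _ l

lemma pv_rstrip_idem (l : List Char) :
    PySem.Chars.rstrip (PySem.Chars.rstrip l) = PySem.Chars.rstrip l := by
  unfold PySem.Chars.rstrip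
  rw [List.reverse_reverse, List.dropWhile_idempotent]

lemma pv_lstrip_strip (l : List Char) :
    PySem.Chars.lstrip (PySem.Chars.strip l) = PySem.Chars.strip l := by
  unfold PySem.Chars.strip
  exact pv_lstrip_rstrip _ (pv_lstrip_idem l)

lemma pv_rstrip_strip (l : List Char) :
    PySem.Chars.rstrip (PySem.Chars.strip l) = PySem.Chars.strip l := by
  unfold PySem.Chars.strip
  rw [pv_rstrip_idem]

lemma pv_strip_idem (l : List Char) :
    PySem.Chars.strip (PySem.Chars.strip l) = PySem.Chars.strip l := by
  show PySem.Chars.rstrip (PySem.Chars.lstrip (PySem.Chars.strip l)) = PySem.Chars.strip l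
  rw [pv_lstrip_strip, pv_rstrip_strip]

-- a takeWhile-prefix of a left-stripped list is left-stripped
lemma pv_lstrip_takeWhile (q : Char → Bool) (l : List Char) (h : PySem.Chars.lstrip l = l) :
    PySem.Chars.lstrip (l.takeWhile q) = l.takeWhile q := by
  unfold PySem.Chars.lstrip at h ⊢
  rw [List.dropWhile_eq_self_iff] at h ⊢
  intro hl
  cases l with
  | nil => simp at hl
  | cons a t =>
    cases hq : q a with
    | false => simp [hq] at hl
    | true =>
      have h0 : (List.takeWhile q (a :: t))[0] = a := by simp [hq]
      rw [h0]
      exact h (by simp)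

-- appending whitespace to a fully stripped list does not change its strip
lemma pv_strip_append_ws (x w : List Char)
    (hxl : PySem.Chars.lstrip x = x) (hxr : PySem.Chars.rstrip x = x)
    (hw : ∀ c ∈ w, PySem.Chars.isspace c = true) :
    PySem.Chars.strip (x ++ w) = x := by
  cases x with
  | nil =>
    unfold PySem.Chars.strip PySem.Chars.lstrip PySem.Chars.rstrip
    rw [List.nil_append, List.dropWhile_eq_nil_iff.mpr hw]
    rfl
  | cons a t =>
    have ha : PySem.Chars.isspace a = false := by
      unfold PySem.Chars.lstrip at hxl
      rw [List.dropWhile_eq_self_iff] at hxl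
      simpa using hxl (by simp)
    unfold PySem.Chars.strip PySem.Chars.lstrip
    rw [List.dropWhile_append]
    simp only [List.dropWhile_cons, ha, Bool.false_eq_true, if_false, List.isEmpty_cons,
      if_false]
    unfold PySem.Chars.rstrip
    rw [List.reverse_append, List.dropWhile_append]
    have hwrev : List.dropWhile PySem.Chars.isspace w.reverse = [] :=
      List.dropWhile_eq_nil_iff.mpr (fun c hc => hw c (List.mem_reverse.mp hc))
    rw [hwrev]
    simp only [List.isEmpty_nil, if_true]
    unfold PySem.Chars.rstrip at hxr
    exact hxr

-- L2': stripping before truncation does not change the stripped truncation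
lemma pv_strip_takeWhile_strip (q : Char → Bool) (m : List Char)
    (hm : PySem.Chars.lstrip m = m) :
    PySem.Chars.strip ((PySem.Chars.strip m).takeWhile q)
      = PySem.Chars.strip (m.takeWhile q) := by
  have hsm : PySem.Chars.strip m = PySem.Chars.rstrip m := by
    unfold PySem.Chars.strip; rw [hm]
  obtain ⟨w, hw, hws⟩ := pv_rstrip_decomp m
  rw [hsm]
  by_cases hlen : ((PySem.Chars.rstrip m).takeWhile q).length = (PySem.Chars.rstrip m).length
  · have htw : (PySem.Chars.rstrip m).takeWhile q = PySem.Chars.rstrip m :=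
      List.IsPrefix.eq_of_length (List.takeWhile_prefix q) hlen
    have hrl : PySem.Chars.lstrip (PySem.Chars.rstrip m) = PySem.Chars.rstrip m :=
      pv_lstrip_rstrip m hm
    have hrr : PySem.Chars.rstrip (PySem.Chars.rstrip m) = PySem.Chars.rstrip m :=
      pv_rstrip_idem m
    conv_rhs => rw [hw]
    rw [List.takeWhile_append, if_pos hlen, htw]
    rw [pv_strip_append_ws _ _ hrl hrr (fun c hc => hws c ((List.takeWhile_prefix q).subset hc))]
    show PySem.Chars.rstrip (PySem.Chars.lstrip (PySem.Chars.rstrip m)) = PySem.Chars.rstrip m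
    rw [hrl, hrr]
  · conv_rhs => rw [hw]
    rw [List.takeWhile_append, if_neg hlen]

-- first piece of a single-character split: accumulator lemma for the fueled worker
lemma pv_go_acc (sep : List Char) :
    ∀ (fuel : Nat) (l cur : List Char) (acc : List (List Char)),
      PySem.Chars.splitOn.go sep fuel l cur acc
        = acc.reverse ++ PySem.Chars.splitOn.go sep fuel l cur [] := by
  intro fuel
  induction fuel with
  | zero => intro l cur acc; simp [PySem.Chars.splitOn.go]
  | succ f ih =>
    intro l cur acc
    cases l with
    | nil => simp [PySem.Chars.splitOn.go]
    | cons ch rest =>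
      simp only [PySem.Chars.splitOn.go]
      by_cases hp : sep.isPrefixOf (ch :: rest)
      · rw [if_pos hp, if_pos hp, ih _ _ (cur.reverse :: acc), ih _ _ [cur.reverse]]
        simp
      · rw [if_neg hp, if_neg hp]
        exact ih _ _ acc

lemma pv_go_head (c : Char) :
    ∀ (fuel : Nat) (l cur : List Char), l.length ≤ fuel →
      ∃ tail, PySem.Chars.splitOn.go [c] fuel l cur []
        = (cur.reverse ++ l.takeWhile (fun d => d != c)) :: tail := by
  intro fuel
  induction fuel with
  | zero =>
    intro l cur h
    have hl : l = [] := List.eq_nil_of_length_eq_zero (Nat.le_zero.mp h)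
    subst hl
    exact ⟨[], by simp [PySem.Chars.splitOn.go]⟩
  | succ f ih =>
    intro l cur h
    cases l with
    | nil => exact ⟨[], by simp [PySem.Chars.splitOn.go]⟩
    | cons ch rest =>
      simp only [PySem.Chars.splitOn.go]
      by_cases hp : [c].isPrefixOf (ch :: rest)
      · have hc : ch = c := by
          have := (List.isPrefixOf_iff_prefix.mp hp)
          exact ((by simpa using this.head (by simp)) : c = ch).symm
        rw [if_pos hp, pv_go_acc]
        subst hc
        refine ⟨PySem.Chars.splitOn.go [ch] f (List.drop [ch].length (ch :: rest)) [] [], ?_⟩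
        simp
      · have hc : ¬ (ch = c) := by
          intro hch
          exact hp (by subst hch; simp [List.isPrefixOf])
        rw [if_neg hp]
        obtain ⟨tail, ht⟩ := ih rest (ch :: cur) (by simpa using Nat.le_of_succ_le_succ h)
        refine ⟨tail, ?_⟩
        rw [ht]
        have : (ch != c) = true := by simp [hc]
        simp [this]

lemma pv_takeWhile_ext (p q : Char → Bool) (h : ∀ a, p a = q a) (l : List Char) :
    l.takeWhile p = l.takeWhile q := by
  rw [show p = q from funext h]

-- one pass of A's separator loop, at the character-list level
lemma pv_stepA (ex sep : String) (c : Char) (hs : sep.toList = [c]) :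
    ((if PySem.Str.isIn sep ex then
        PySem.Str.strip (((PySem.Str.split? ex sep).getD []).headD "")
      else ex)).toList
      = if c ∈ ex.toList then PySem.Chars.strip (ex.toList.takeWhile (fun d => d != c))
        else ex.toList := by
  by_cases hin : c ∈ ex.toList
  · have hisin : PySem.Str.isIn sep ex = true := by
      unfold PySem.Str.isIn
      rw [hs]
      exact (PySem.Chars.isIn_iff_infix _ _).mpr ((List.singleton_infix_iff c _).mpr hin)
    rw [if_pos hisin, if_pos hin]
    unfold PySem.Str.split?
    rw [hs]
    unfold PySem.Chars.split?
    simp only [List.isEmpty_cons]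
    obtain ⟨tail, ht⟩ := pv_go_head c (ex.toList.length + 1) ex.toList [] (by omega)
    unfold PySem.Chars.splitOn
    rw [ht]
    simp [PySem.Str.toList_strip, String.toList_ofList]
  · have hisin : PySem.Str.isIn sep ex = false := by
      unfold PySem.Str.isIn
      rw [hs]
      rw [PySem.Chars.isIn_eq_false_iff]
      intro hinf
      exact hin ((List.singleton_infix_iff c _).mp hinf)
    rw [hisin]
    simp only [Bool.false_eq_true, if_false]
    rw [if_neg hin]

-- if the input is fully stripped, A's conditional pass is an unconditional strip-truncate
lemma pv_step_strip (t : List Char) (c : Char) (h : PySem.Chars.strip t = t) :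
    (if c ∈ t then PySem.Chars.strip (t.takeWhile (fun d => d != c)) else t)
      = PySem.Chars.strip (t.takeWhile (fun d => d != c)) := by
  by_cases hc : c ∈ t
  · rw [if_pos hc]
  · rw [if_neg hc]
    rw [List.takeWhile_eq_self_iff.mpr (fun x hx => by simp; intro he; exact hc (he ▸ hx))]
    exact h.symm

-- B's scanning loop, characterised
lemma pv_altLoop_toList (ex : String) :
    ∀ (l : List Char) (k : Nat), ex.toList.drop k = l →
      (pvAltLoop ex (PySem.List.enumerate l (k : Int))).toList
        = if l.any pvSep then
            PySem.Chars.strip (ex.toList.take (k + (l.takeWhile (fun d => !pvSep d)).length))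
          else ex.toList := by
  intro l
  induction l with
  | nil => intro k hk; simp [PySem.List.enumerate, pvAltLoop]
  | cons ch rest ih =>
    intro k hk
    rw [PySem.List.enumerate_cons]
    by_cases hs : ch ∈ ['(', ' ', '/']
    · have hsep : pvSep ch = true := by unfold pvSep; exact decide_eq_true hs
      simp only [pvAltLoop, if_pos hs]
      rw [PySem.Str.toList_strip, PySem.Str.toList_slice]
      simp only [PySem.Chars.slice_eq_listSlice]
      rw [PySem.List.slice_to ex.toList (Int.natCast_nonneg k)]
      simp [hsep, List.any_cons, Int.toNat_natCast]
    · have hsep : pvSep ch = false := by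
        simp only [pvSep]
        exact decide_eq_false hs
      have hrest : ex.toList.drop (k + 1) = rest := by
        rw [List.drop_add_one_eq_tail_drop, hk]
        rfl
      have hcast : (k : Int) + 1 = ((k + 1 : Nat) : Int) := by push_cast; ring
      simp only [pvAltLoop, if_neg hs]
      rw [hcast, ih (k + 1) hrest]
      simp only [List.any_cons, Bool.false_or, List.takeWhile_cons, hsep,
        Bool.not_false, if_true, List.length_cons]
      by_cases ha : rest.any pvSep
      · rw [if_pos ha, if_pos ha]
        congr 2
        omega
      · rw [if_neg ha, if_neg ha]

set_option maxHeartbeats 1000000 in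
theorem normalize_exchange_py_spec : Claim_equal_normalize_exchange_py := by
  intro value _
  unfold Spec_normalize_exchange_py
  rw [← String.toList_inj]
  simp only [normalize_exchange_py, normalize_exchange_py_alt]
  generalize hex : PySem.Str.upper (PySem.Str.strip value) = ex
  have hcs : ex.toList = PySem.Chars.upper (PySem.Chars.strip value.toList) := by
    rw [← hex, PySem.Str.toList_upper, PySem.Str.toList_strip]
  have hstrip : PySem.Chars.strip ex.toList = ex.toList := by
    rw [hcs, pv_strip_upper, pv_strip_idem]
  have hl : PySem.Chars.lstrip ex.toList = ex.toList := by
    calc PySem.Chars.lstrip ex.toList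
        = PySem.Chars.lstrip (PySem.Chars.strip ex.toList) := by rw [hstrip]
      _ = PySem.Chars.strip ex.toList := pv_lstrip_strip _
      _ = ex.toList := hstrip
  -- B's value
  have hB : (pvAltLoop ex (PySem.List.enumerate ex.toList 0)).toList
      = if ex.toList.any pvSep then
          PySem.Chars.strip (ex.toList.takeWhile (fun d => !pvSep d))
        else ex.toList := by
    have := pv_altLoop_toList ex ex.toList 0 (by simp)
    rw [Nat.cast_zero] at this
    rw [this]
    by_cases ha : ex.toList.any pvSep
    · rw [if_pos ha, if_pos ha, Nat.zero_add]
      rw [← List.prefix_iff_eq_take.mp (List.takeWhile_prefix _)]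
    · rw [if_neg ha, if_neg ha]
  by_cases hemp : ex = ""
  · rw [if_pos hemp, hB]
    have : ex.toList = [] := by rw [hemp]; rfl
    simp [this]
  · rw [if_neg hemp]
    simp only [List.foldl_cons, List.foldl_nil]
    -- A's three passes, pushed to the character level
    rw [pv_stepA _ "/" '/' rfl, pv_stepA _ " " ' ' rfl, pv_stepA _ "(" '(' rfl]
    rw [pv_step_strip _ _ hstrip]
    rw [pv_step_strip _ _ (pv_strip_idem _)]
    rw [pv_step_strip _ _ (pv_strip_idem _)]
    -- collapse strip∘takeWhile chains
    rw [pv_strip_takeWhile_strip _ _ (pv_lstrip_takeWhile _ _ hl)]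
    rw [List.takeWhile_takeWhile]
    rw [pv_strip_takeWhile_strip _ _ (pv_lstrip_takeWhile _ _ hl)]
    rw [List.takeWhile_takeWhile]
    rw [hB]
    by_cases ha : ex.toList.any pvSep
    · rw [if_pos ha]
      refine congrArg PySem.Chars.strip (pv_takeWhile_ext _ _ (fun a => ?_) _)
      by_cases h1 : a = '(' <;> by_cases h2 : a = ' ' <;> by_cases h3 : a = '/' <;>
        simp [pvSep, h1, h2, h3]
    · rw [if_neg ha]
      have hall : ∀ x ∈ ex.toList, ¬ pvSep x = true :=
        List.any_eq_false.mp (Bool.eq_false_iff.mpr ha)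
      have hself : ∀ (p : Char → Bool), (∀ x ∈ ex.toList, p x = true) →
          PySem.Chars.strip (ex.toList.takeWhile p) = ex.toList := by
        intro p hp
        rw [List.takeWhile_eq_self_iff.mpr hp, hstrip]
      apply hself
      intro x hx
      have hpx := hall x hx
      simp only [pvSep, decide_eq_true_eq, List.mem_cons, List.not_mem_nil, or_false,
        not_or] at hpx
      simp [hpx.1, hpx.2.1, hpx.2.2]
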